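-- pv_equiv track=rewrite | github.com/johnwclemens/tags | tags.py | getTitleB
-- ===== SOURCE A (Python) =====
-- def getTitleB(s):
--     t = ''
--     isWord = True
--     for i in range(0, len(s)):
--         if s[i] not in {'(', ')'}:
--             if isWord:
--                 t += s[i].upper()
--                 isWord = False
--             else: t += s[i]
--             if s[i] == ' ': isWord = True
--     return t
-- ===== SOURCE B (Python) =====
-- def getTitleB(s):
--     t = ''.join(c for c in s if c not in '()')
--     return ' '.join(w[:1].upper() + w[1:] for w in t.split(' '))
-- ===== Notes on version B (the rewrite author's own statement) =====
-- stated objective: idiomatic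
-- what changed: Replaces A's single stateful char-scan (isWord flag threaded through an index loop with quadratic += concatenation) with a two-stage pipeline: drop parentheses with a filtering join, split on single spaces, uppercase each token's first character, and rejoin.
import Mathlib
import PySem

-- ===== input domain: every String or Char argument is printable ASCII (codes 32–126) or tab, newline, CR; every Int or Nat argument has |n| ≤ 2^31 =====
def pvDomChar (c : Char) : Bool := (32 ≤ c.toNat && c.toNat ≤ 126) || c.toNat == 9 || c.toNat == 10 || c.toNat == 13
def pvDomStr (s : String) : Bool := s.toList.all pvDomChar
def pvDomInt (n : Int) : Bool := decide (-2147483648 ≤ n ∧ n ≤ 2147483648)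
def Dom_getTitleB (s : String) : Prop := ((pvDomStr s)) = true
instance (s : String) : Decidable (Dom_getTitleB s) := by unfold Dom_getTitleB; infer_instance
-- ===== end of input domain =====

-- B drops parentheses and capitalizes word-starts as a filter/split/capitalize/join pipeline instead of A's stateful char-scan.

-- ===== PORT A =====
-- the loop body: skip '(' ')', else append (upper-cased if isWord), then reset isWord on ' '
def pvStepA (st : List Char × Bool) (c : Char) : List Char × Bool :=
  if c = '(' ∨ c = ')' then st
  else ((if st.2 then st.1 ++ [PySem.Chars.upperChar c] else st.1 ++ [c]), c == ' ')

def getTitleB (s : String) : String :=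
  -- t = ''; isWord = True; for i in range(0, len(s)): …
  let r := (PySem.List.pyRange 0 (PySem.Str.len s) 1).foldl
    (fun st i => pvStepA st (PySem.List.pyGetD s.toList i ' ')) ([], true)
  String.mk r.1

-- ===== PORT B =====
-- w[:1].upper() + w[1:]
def pvCapFirst (w : List Char) : List Char :=
  PySem.Chars.upper (PySem.List.slice w none (some 1)) ++ PySem.List.slice w (some 1) none

def getTitleB_alt (s : String) : String :=
  -- t = ''.join(c for c in s if c not in '()'); ' '.join(w[:1].upper() + w[1:] for w in t.split(' '))
  String.mk (PySem.Chars.join [' ']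
    ((PySem.Chars.splitOn
        (PySem.Chars.join [] ((s.toList.filter (fun c => !(c == '(' || c == ')'))).map (fun c => [c])))
        [' ']).map pvCapFirst))

-- ===== PRECONDITION & SPEC =====
def Spec_getTitleB (s : String) (out : String) : Prop := out = getTitleB_alt s
instance (s : String) (out : String) : Decidable (Spec_getTitleB s out) := by unfold Spec_getTitleB; infer_instance

-- ===== CLAIM (what is proved, stated in full; the proofs are below) =====
def Claim_equal_getTitleB : Prop := ∀ (s : String), Dom_getTitleB s → Spec_getTitleB s (getTitleB s)

-- ===== LEMMAS AND PROOFS =====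

-- the capitalizer: flag b says "next char starts a word"; parens already removed
def capRun : Bool → List Char → List Char
  | _, [] => []
  | b, c :: cs => (if b then PySem.Chars.upperChar c else c) :: capRun (c == ' ') cs

-- A's loop as structural recursion (parens skipped, flag untouched by them)
def aRun : Bool → List Char → List Char
  | _, [] => []
  | b, c :: cs =>
    if c = '(' ∨ c = ')' then aRun b cs
    else (if b then PySem.Chars.upperChar c else c) :: aRun (c == ' ') cs

theorem upperChar_space : PySem.Chars.upperChar ' ' = ' ' := by decide

theorem aFold_eq (cs : List Char) : ∀ (b : Bool) (acc : List Char),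
    (cs.foldl pvStepA (acc, b)).1 = acc ++ aRun b cs := by
  induction cs with
  | nil => intro b acc; simp [aRun]
  | cons c cs ih =>
    intro b acc
    by_cases hc : c = '(' ∨ c = ')'
    · simp only [List.foldl_cons, pvStepA, if_pos hc, aRun, ih]
    · simp only [List.foldl_cons, pvStepA, if_neg hc, aRun, ih]
      cases b <;> simp

theorem aRun_eq_capRun_filter (cs : List Char) : ∀ (b : Bool),
    aRun b cs = capRun b (cs.filter (fun c => !(c == '(' || c == ')'))) := by
  induction cs with
  | nil => intro b; rfl
  | cons c cs ih =>
    intro b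
    by_cases hc : c = '(' ∨ c = ')'
    · have hf : (!(c == '(' || c == ')')) = false := by
        rcases hc with h | h <;> simp [h]
      simp only [aRun, if_pos hc, ih, List.filter_cons, hf, Bool.false_eq_true, if_false]
    · have hf : (!(c == '(' || c == ')')) = true := by
        rcases not_or.mp hc with ⟨h1, h2⟩; simp [h1, h2]
      simp only [aRun, if_neg hc, ih, List.filter_cons, hf, if_true, capRun]

theorem mh_id {α : Type} (l : List (List α)) : List.modifyHead (fun x => x) l = l := by
  cases l <;> rfl

theorem go_spec (fuel : Nat) : ∀ (l cur : List Char) (acc : List (List Char)),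
    l.length < fuel →
    PySem.Chars.splitOn.go [' '] fuel l cur acc
      = acc.reverse ++ (l.splitOn ' ').modifyHead (cur.reverse ++ ·) := by
  induction fuel with
  | zero => intro l cur acc h; omega
  | succ n ih =>
    intro l cur acc h
    cases l with
    | nil => simp [PySem.Chars.splitOn.go, List.splitOn, List.splitOnP_nil]
    | cons c rest =>
      simp only [PySem.Chars.splitOn.go]
      by_cases hc : c = ' '
      · subst hc
        simp [List.isPrefixOf, ih rest [] _ (by simpa using Nat.lt_of_succ_lt_succ h),
          List.splitOn, List.splitOnP_cons, mh_id]
      · have hpre : List.isPrefixOf [' '] (c :: rest) = false := by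
          simp [List.isPrefixOf]; exact fun h' => hc h'.symm
        rw [hpre]
        simp only [Bool.false_eq_true, if_false]
        rw [ih rest (c :: cur) acc (by simpa using Nat.lt_of_succ_lt_succ h)]
        have hne := List.splitOnP_ne_nil (fun x => x == ' ') rest
        simp only [List.splitOn, List.splitOnP_cons, beq_iff_eq, if_neg hc]
        cases hrec : List.splitOnP (fun x => x == ' ') rest with
        | nil => exact absurd hrec hne
        | cons hH t => simp

theorem splitOn_eq (cs : List Char) :
    PySem.Chars.splitOn cs [' '] = cs.splitOn ' ' := by
  have := go_spec (cs.length + 1) cs [] [] (by omega)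
  simpa [PySem.Chars.splitOn, mh_id] using this

theorem capFirst_nil : pvCapFirst [] = [] := rfl

theorem capFirst_cons (c : Char) (w : List Char) :
    pvCapFirst (c :: w) = PySem.Chars.upperChar c :: w := by
  simp [pvCapFirst, PySem.List.slice, PySem.Chars.upper, PySem.List.clampIdx]

theorem ic_cons (x h : List Char) (t : List (List Char)) :
    [' '].intercalate (x :: h :: t) = x ++ ' ' :: [' '].intercalate (h :: t) := by
  simp [List.intercalate, List.intersperse]

theorem ic_singleton (x : List Char) : [' '].intercalate [x] = x := by
  simp [List.intercalate]

theorem ic_cons' (x : List Char) (t : List (List Char)) (ht : t ≠ []) :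
    [' '].intercalate (x :: t) = x ++ ' ' :: [' '].intercalate t := by
  cases t with
  | nil => exact absurd rfl ht
  | cons h t' => exact ic_cons x h t'

theorem main_caps (ds : List Char) :
    ([' '].intercalate ((ds.splitOn ' ').map pvCapFirst) = capRun true ds) ∧
    (∀ h t, ds.splitOn ' ' = h :: t →
      [' '].intercalate (h :: t.map pvCapFirst) = capRun false ds) := by
  induction ds with
  | nil =>
    constructor
    · simp [List.splitOn, List.splitOnP_nil, capFirst_nil, ic_singleton, capRun]
    · intro h t hh
      simp [List.splitOn, List.splitOnP_nil] at hh
      simp [hh.1, hh.2, ic_singleton, capRun]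
  | cons c rest ih =>
    obtain ⟨ihQ, ihR⟩ := ih
    have hne : rest.splitOn ' ' ≠ [] := List.splitOnP_ne_nil _ rest
    by_cases hc : c = ' '
    · subst hc
      have hsplit : (' ' :: rest).splitOn ' ' = [] :: rest.splitOn ' ' := by
        simp [List.splitOn, List.splitOnP_cons]
      constructor
      · rw [hsplit, List.map_cons, capFirst_nil,
          ic_cons' [] _ (by simpa using hne), ihQ]
        simp [capRun, upperChar_space]
      · intro h t hh
        rw [hsplit] at hh
        injection hh with h1 h2
        subst h1; subst h2
        rw [ic_cons' [] _ (by simpa using hne), ihQ]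
        simp [capRun]
    · cases hrec : rest.splitOn ' ' with
      | nil => exact absurd hrec hne
      | cons h0 t0 =>
        have hb : (c == ' ') = false := by simp [hc]
        have hsplit : (c :: rest).splitOn ' ' = (c :: h0) :: t0 := by
          have hrec' : List.splitOnP (fun x => x == ' ') rest = h0 :: t0 := hrec
          simp [List.splitOn, List.splitOnP_cons, if_neg hc, hrec', List.modifyHead]
        constructor
        · rw [hsplit, List.map_cons, capFirst_cons]
          have hR := ihR h0 t0 hrec
          cases t0 with
          | nil =>
            simp only [List.map_nil] at hR ⊢
            rw [ic_singleton] at hR ⊢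
            simp [capRun, hb, hR]
          | cons u v =>
            rw [ic_cons' _ _ (by simp)]
            rw [ic_cons' _ _ (by simp)] at hR
            simp only [List.map_cons] at hR
            simp [capRun, hb, hR]
        · intro h t hh
          rw [hsplit] at hh
          injection hh with h1 h2
          subst h1; subst h2
          have hR := ihR h0 t0 hrec
          cases t0 with
          | nil =>
            simp only [List.map_nil] at hR ⊢
            rw [ic_singleton] at hR ⊢
            simp [capRun, hb, hR]
          | cons u v =>
            rw [ic_cons' _ _ (by simp)] at hR ⊢
            simp only [List.map_cons] at hR
            simp [capRun, hb, hR]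

theorem alt_eq (s : String) :
    getTitleB_alt s
      = String.mk (capRun true (s.toList.filter (fun c => !(c == '(' || c == ')')))) := by
  unfold getTitleB_alt
  rw [PySem.Chars.join_nil_singletons, splitOn_eq]
  have := (main_caps (s.toList.filter (fun c => !(c == '(' || c == ')')))).1
  simp only [PySem.Chars.join]
  rw [this]

-- ===== VERDICT (by name: the statement is the Claim_ definition above) =====
theorem getTitleB_spec : Claim_equal_getTitleB := by
  intro s _
  unfold Spec_getTitleB
  unfold getTitleB
  rw [alt_eq]
  have hlen : PySem.Str.len s = ((s.toList.length : Nat) : Int) := by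
    simp [PySem.Str.len]
  simp only [hlen]
  rw [PySem.List.foldl_pyRange_zero_pyGetD' s.toList ' ' pvStepA ([], true)]
  rw [aFold_eq s.toList true []]
  rw [aRun_eq_capRun_filter]
  simp
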